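-- pv_equiv track=rewrite | github.com/denteyon/AlgoDeepDive | PlayGround/DistinctMeaning.py | numberOfDistinctMeanings
-- ===== SOURCE A (Python) =====
-- import collections
--
-- def numberOfDistinctMeanings(words):
--
--     def isSimilar(word1, word2):
--         if len(word2) - len(word1) != 1:
--             return False
--         for i in range(len(word1)):
--             if word1[i] != word2[i]:
--                 return word1[i:] == word2[i+1:]
--         return True
--
--     def markDfs(wi):
--         visited.add(wi)
--         for v in adj[wi]:
--             if v not in visited:
--                 markDfs(v)
--
--     words.sort(key=len)
--     n = len(words)
--     adj = collections.defaultdict(list)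
--     visited = set()
--
--     for i in range(n - 1):
--         for j in range(i + 1, n):
--             if isSimilar(words[i], words[j]):
--                 adj[i].append(j)
--                 adj[j].append(i)
--
--     count = 0
--     for i in range(n):
--         if i not in visited:
--             count += 1
--             markDfs(i)
--     return count
-- ===== SOURCE B (Python) =====
-- import collections
--
-- def numberOfDistinctMeanings(words):
--     # Hash-indexed re-implementation: instead of testing all O(n^2) pairs with
--     # isSimilar, build dictionaries keyed by words and by their one-char-deletion
--     # variants; each node's neighbours are found by O(L) dictionary lookups.
--     ws = sorted(words, key=len)
--     n = len(ws)
--     index = collections.defaultdict(list)     # word -> indices carrying it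
--     varIndex = collections.defaultdict(list)  # deletion variant -> indices of longer word
--     for j, w in enumerate(ws):
--         index[w].append(j)
--         for p in range(len(w)):
--             varIndex[w[:p] + w[p+1:]].append(j)
--
--     def neighbors(u):
--         w = ws[u]
--         smaller = set()
--         for p in range(len(w)):
--             smaller.update(index.get(w[:p] + w[p+1:], []))
--         larger = set(varIndex.get(w, []))
--         return sorted(smaller) + sorted(larger)
--
--     visited = set()
--
--     def mark(u):
--         visited.add(u)
--         for v in neighbors(u):
--             if v not in visited:
--                 mark(v)
--
--     count = 0
--     for u in range(n):
--         if u not in visited: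
--             count += 1
--             mark(u)
--     return count
-- ===== Notes on version B (the rewrite author's own statement) =====
-- stated objective: faster
-- what changed: Replaces A's O(n^2) all-pairs isSimilar scan for building the similarity graph by two hash maps (word -> indices and one-char-deletion variant -> indices), so each node's neighbours are found by O(L) dictionary lookups; the component count over that graph is unchanged.
import Mathlib
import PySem

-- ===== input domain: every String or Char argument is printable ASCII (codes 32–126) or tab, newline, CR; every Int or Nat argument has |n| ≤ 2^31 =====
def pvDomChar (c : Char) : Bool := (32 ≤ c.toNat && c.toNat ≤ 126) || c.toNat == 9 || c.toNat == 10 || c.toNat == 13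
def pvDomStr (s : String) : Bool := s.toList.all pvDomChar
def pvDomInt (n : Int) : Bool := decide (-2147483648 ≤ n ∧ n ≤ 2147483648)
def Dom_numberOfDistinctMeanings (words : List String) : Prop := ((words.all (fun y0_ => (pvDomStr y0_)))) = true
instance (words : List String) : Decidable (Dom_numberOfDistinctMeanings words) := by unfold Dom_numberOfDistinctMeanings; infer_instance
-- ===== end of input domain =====

-- B replaces A's O(n^2) all-pairs isSimilar scan by hash maps keyed by words and their
-- one-char-deletion variants (objective: faster, as measured); the equivalence proved here is about
-- the RETURN value only — Python A sorts the caller's list in place, B does not mutate it.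

-- ===== PORT A =====
-- Python's `for i in range(len(word1)): if word1[i] != word2[i]: return word1[i:] == word2[i+1:]`
-- rendered as simultaneous head recursion over the two character lists (i-th iteration = i-th heads;
-- exact: the loop runs over word1, and the guard in isSimilar makes word2 one longer, so word2[i]
-- never goes out of range; the `_ :: _, []` case is unreachable under that guard).
def isSimilarLoop : List Char → List Char → Bool
  | [], _ => true
  | _ :: _, [] => true
  | x :: a, y :: b => if x ≠ y then decide (x :: a = b) else isSimilarLoop a b

def isSimilar (w1 w2 : String) : Bool :=
  if PySem.Str.len w2 - PySem.Str.len w1 ≠ 1 then false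
  else isSimilarLoop w1.toList w2.toList

-- the double loop `for i in range(n-1): for j in range(i+1, n): …` filling the defaultdict(list);
-- words[i] via pyGetD (i, j are always in range here)
def buildAdj (ws : List String) (n : Int) : PySem.Dict Int (List Int) :=
  (PySem.List.pyRange 0 (n - 1) 1).foldl (fun d i =>
      (PySem.List.pyRange (i + 1) n 1).foldl (fun d j =>
        if isSimilar (PySem.List.pyGetD ws i "") (PySem.List.pyGetD ws j "") then
          PySem.Dict.modify (PySem.Dict.modify d i [] (· ++ [j])) j [] (· ++ [i])
        else d) d)
    PySem.Dict.empty

-- recursive markDfs with the mutable `visited` set threaded through; fuel ws.length + 1 never runs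
-- out on the calls actually made (every nested call is guarded by `v not in visited` and adds one
-- previously unvisited node, so the nesting depth is at most the number of nodes)
def markDfs (adj : PySem.Dict Int (List Int)) : Nat → Int → PySem.Set Int → PySem.Set Int
  | 0, _, vis => vis
  | fuel + 1, wi, vis =>
    (PySem.Dict.getD adj wi []).foldl
      (fun vs v => if v ∈ vs then vs else markDfs adj fuel v vs)
      (PySem.Set.add vis wi)

def numberOfDistinctMeanings (words : List String) : Int :=
  let ws := PySem.List.sorted words (fun w => PySem.Str.len w) false
  let n : Int := PySem.List.len ws
  let adj := buildAdj ws n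
  let st := (PySem.List.pyRange 0 n 1).foldl
    (fun (st : PySem.Set Int × Int) i =>
      if i ∈ st.1 then st else (markDfs adj (ws.length + 1) i st.1, st.2 + 1))
    ([], 0)
  st.2

-- ===== PORT B =====
-- w[:p] + w[p+1:]
def deleteAt (w : String) (p : Int) : String :=
  String.ofList (PySem.List.slice w.toList none (some p) ++ PySem.List.slice w.toList (some (p + 1)) none)

-- the single loop `for j, w in enumerate(ws): index[w].append(j); for p in …: varIndex[…].append(j)`
def altIndexes (ws : List String) :
    PySem.Dict String (List Int) × PySem.Dict String (List Int) :=
  (PySem.List.enumerate ws 0).foldl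
    (fun st jw =>
      (PySem.Dict.modify st.1 jw.2 [] (· ++ [jw.1]),
       (PySem.List.pyRange 0 (PySem.Str.len jw.2) 1).foldl
         (fun d p => PySem.Dict.modify d (deleteAt jw.2 p) [] (· ++ [jw.1])) st.2))
    (PySem.Dict.empty, PySem.Dict.empty)

-- neighbors(u); u is always a valid index at every call site, so ws[u] is read with pyGetD
def altNeighbors (ws : List String) (index varIndex : PySem.Dict String (List Int)) (u : Int) :
    List Int :=
  let w := PySem.List.pyGetD ws u ""
  let smaller : PySem.Set Int :=
    (PySem.List.pyRange 0 (PySem.Str.len w) 1).foldl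
      (fun s p => PySem.Set.update s (PySem.Dict.getD index (deleteAt w p) [])) []
  let larger : PySem.Set Int := PySem.Set.ofList (PySem.Dict.getD varIndex w [])
  PySem.List.sorted smaller (fun x => x) false ++ PySem.List.sorted larger (fun x => x) false

-- recursive mark, same fuel discipline as A's markDfs
def altMark (ws : List String) (index varIndex : PySem.Dict String (List Int)) :
    Nat → Int → PySem.Set Int → PySem.Set Int
  | 0, _, vis => vis
  | fuel + 1, u, vis =>
    (altNeighbors ws index varIndex u).foldl
      (fun vs v => if v ∈ vs then vs else altMark ws index varIndex fuel v vs)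
      (PySem.Set.add vis u)

def numberOfDistinctMeanings_alt (words : List String) : Int :=
  let ws := PySem.List.sorted words (fun w => PySem.Str.len w) false
  let n : Int := PySem.List.len ws
  let ix := altIndexes ws
  let st := (PySem.List.pyRange 0 n 1).foldl
    (fun (st : PySem.Set Int × Int) u =>
      if u ∈ st.1 then st else (altMark ws ix.1 ix.2 (ws.length + 1) u st.1, st.2 + 1))
    ([], 0)
  st.2

-- ===== PRECONDITION & SPEC =====
def Spec_numberOfDistinctMeanings (words : List String) (out : Int) : Prop := out = numberOfDistinctMeanings_alt words
instance (words : List String) (out : Int) : Decidable (Spec_numberOfDistinctMeanings words out) := by unfold Spec_numberOfDistinctMeanings; infer_instance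

-- ===== CLAIM (what is proved, stated in full; the proofs are below) =====
def Claim_equal_numberOfDistinctMeanings : Prop := ∀ (words : List String), Dom_numberOfDistinctMeanings words → Spec_numberOfDistinctMeanings words (numberOfDistinctMeanings words)

-- ===== LEMMAS AND PROOFS =====

-- the similarity test between the words stored at indices i and j
def simIdx (ws : List String) (i j : Int) : Bool :=
  isSimilar (PySem.List.pyGetD ws i "") (PySem.List.pyGetD ws j "")

-- the two halves of A's adjacency list of node u: smaller-index, then larger-index neighbours
def nbSmall (ws : List String) (u : Int) : List Int :=
  (PySem.List.pyRange 0 u 1).filter (fun k => simIdx ws k u)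
def nbLarge (ws : List String) (n u : Int) : List Int :=
  (PySem.List.pyRange (u + 1) n 1).filter (fun k => simIdx ws u k)

-- the (key, appended value) updates performed by buildAdj, flattened into one list
def adjUps (ws : List String) (n : Int) : List (Int × Int) :=
  (PySem.List.pyRange 0 (n - 1) 1).flatMap (fun i =>
    (PySem.List.pyRange (i + 1) n 1).flatMap (fun j =>
      if simIdx ws i j then [(i, j), (j, i)] else []))

def varUps (ws : List String) : List (String × Int) :=
  (PySem.List.enumerate ws 0).flatMap
    (fun jw => (PySem.List.pyRange 0 (PySem.Str.len jw.2) 1).map (fun p => (deleteAt jw.2 p, jw.1)))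

theorem strLen_eq (s : String) : PySem.Str.len s = (s.toList.length : Int) := by simp [pysem]

theorem isSimilarLoop_iff (a : List Char) : ∀ (b : List Char), b.length = a.length + 1 →
    (isSimilarLoop a b = true ↔ ∃ p < b.length, b.eraseIdx p = a) := by
  induction a with
  | nil =>
    intro b h
    match b, h with
    | [y], _ => simp [isSimilarLoop]
  | cons x a' ih =>
    intro b h
    match b with
    | y :: b' =>
      simp only [List.length_cons, Nat.add_right_cancel_iff] at h
      by_cases hxy : x = y
      · subst hxy
        simp only [isSimilarLoop]
        rw [if_neg (by simp)]
        rw [ih b' h]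
        constructor
        · rintro ⟨p, hp, he⟩
          exact ⟨p + 1, by simpa using hp, by simp [List.eraseIdx_cons_succ, he]⟩
        · rintro ⟨p, hp, he⟩
          match p with
          | 0 =>
            simp only [List.eraseIdx_cons_zero] at he
            exact ⟨0, by omega, by rw [he]; simp⟩
          | q + 1 =>
            simp only [List.eraseIdx_cons_succ, List.cons.injEq] at he
            exact ⟨q, by simpa using hp, he.2⟩
      · simp only [isSimilarLoop, if_pos (by simpa using hxy), decide_eq_true_eq]
        constructor
        · intro he
          exact ⟨0, by simp, by simp [he]⟩
        · rintro ⟨p, hp, he⟩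
          match p with
          | 0 => simpa using he.symm
          | q + 1 =>
            simp only [List.eraseIdx_cons_succ, List.cons.injEq] at he
            exact absurd he.1.symm hxy

theorem isSimilar_iff (w1 w2 : String) :
    isSimilar w1 w2 = true ↔ ∃ p < w2.toList.length, w2.toList.eraseIdx p = w1.toList := by
  unfold isSimilar
  by_cases hg : (PySem.Str.len w2 - PySem.Str.len w1 ≠ 1)
  · rw [if_pos hg]
    simp only [Bool.false_eq_true, false_iff, not_exists]
    rintro p ⟨hp, he⟩
    apply hg
    have := congrArg List.length he
    rw [List.length_eraseIdx_of_lt hp] at this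
    have hl1 : PySem.Str.len w1 = (w1.toList.length : Int) := by simp [pysem]
    have hl2 : PySem.Str.len w2 = (w2.toList.length : Int) := by simp [pysem]
    rw [hl1, hl2]
    omega
  · rw [if_neg hg]
    apply isSimilarLoop_iff
    have hl1 : PySem.Str.len w1 = (w1.toList.length : Int) := by simp [pysem]
    have hl2 : PySem.Str.len w2 = (w2.toList.length : Int) := by simp [pysem]
    rw [hl1, hl2] at hg
    omega

theorem deleteAt_natCast (w : String) (p : Nat) :
    (deleteAt w (p : Int)).toList = w.toList.eraseIdx p := by
  unfold deleteAt
  rw [List.eraseIdx_eq_take_drop_succ]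
  have h1 : PySem.List.slice w.toList none (some (p:Int)) = w.toList.take p := PySem.List.slice_to_natCast _ _
  have h2 : PySem.List.slice w.toList (some ((p:Int)+1)) none = w.toList.drop (p+1) := by
    have := PySem.List.slice_from_natCast w.toList (p+1)
    push_cast at this
    exact this
  rw [h1, h2]
  simp

theorem altIndexes_eq (ws : List String) :
    altIndexes ws =
      (((PySem.List.enumerate ws 0).map (fun jw => (jw.2, jw.1))).foldl
          (fun d p => PySem.Dict.modify d p.1 [] (· ++ [p.2])) PySem.Dict.empty,
       (varUps ws).foldl (fun d p => PySem.Dict.modify d p.1 [] (· ++ [p.2])) PySem.Dict.empty) := by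
  unfold altIndexes varUps
  rw [PySem.List.foldl_prod_mk
    (fun d (jw : Int × String) => PySem.Dict.modify d jw.2 [] (· ++ [jw.1]))
    (fun d (jw : Int × String) => (PySem.List.pyRange 0 (PySem.Str.len jw.2) 1).foldl
       (fun d p => PySem.Dict.modify d (deleteAt jw.2 p) [] (· ++ [jw.1])) d)]
  simp only [List.foldl_map, List.foldl_flatMap]

theorem index_getD (ws : List String) (v : String) :
    PySem.Dict.getD (altIndexes ws).1 v [] =
      ((PySem.List.enumerate ws 0).filter (fun jw => jw.2 == v)).map (·.1) := by
  rw [altIndexes_eq]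
  rw [PySem.Dict.getD_foldl_modify_append]
  simp [List.filter_map, List.map_map, Function.comp_def]

theorem varIndex_getD (ws : List String) (v : String) :
    PySem.Dict.getD (altIndexes ws).2 v [] =
      ((varUps ws).filter (fun q => q.1 == v)).map (·.2) := by
  rw [altIndexes_eq]
  rw [PySem.Dict.getD_foldl_modify_append]
  simp

theorem mem_index_getD (ws : List String) (v : String) (x : Int) :
    x ∈ PySem.Dict.getD (altIndexes ws).1 v [] ↔
      ∃ k : Nat, ∃ _ : k < ws.length, x = (k : Int) ∧ ws[k] = v := by
  rw [index_getD]
  simp only [List.mem_map, List.mem_filter, PySem.List.mem_enumerate_iff, beq_iff_eq]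
  constructor
  · rintro ⟨jw, ⟨⟨k, hk, rfl⟩, hv⟩, rfl⟩
    exact ⟨k, hk, by simp, hv⟩
  · rintro ⟨k, hk, rfl, hv⟩
    exact ⟨((k:Int), ws[k]), ⟨⟨k, hk, by simp⟩, hv⟩, rfl⟩

theorem mem_varIndex_getD (ws : List String) (v : String) (x : Int) :
    x ∈ PySem.Dict.getD (altIndexes ws).2 v [] ↔
      ∃ k : Nat, ∃ _ : k < ws.length, x = (k : Int) ∧
        ∃ p : Nat, p < ws[k].toList.length ∧ deleteAt ws[k] (p : Int) = v := by
  rw [varIndex_getD]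
  unfold varUps
  simp only [List.mem_map, List.mem_filter, List.mem_flatMap, PySem.List.mem_enumerate_iff,
    PySem.List.mem_pyRange_one, beq_iff_eq]
  constructor
  · rintro ⟨q, ⟨⟨jw, ⟨⟨k, hk, rfl⟩, ⟨p, ⟨hp0, hp1⟩, rfl⟩⟩⟩, hv⟩, rfl⟩
    dsimp only at hp1 hv ⊢
    refine ⟨k, hk, by simp, p.toNat, ?_, ?_⟩
    · rw [strLen_eq] at hp1; omega
    · rwa [show ((p.toNat : Nat) : Int) = p by omega]
  · rintro ⟨k, hk, rfl, p, hp, hv⟩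
    refine ⟨(deleteAt ws[k] (p:Int), (k:Int)), ⟨⟨((k:Int), ws[k]), ⟨⟨k, hk, by simp⟩, ⟨(p:Int), ⟨by omega, ?_⟩, rfl⟩⟩⟩, hv⟩, rfl⟩
    dsimp only
    rw [strLen_eq]; omega

theorem mem_foldl_update {α : Type} [BEq α] [LawfulBEq α] (l : List α) (f : α → List Int)
    (s0 : PySem.Set Int) (x : Int) :
    x ∈ l.foldl (fun s p => PySem.Set.update s (f p)) s0 ↔ x ∈ s0 ∨ ∃ p ∈ l, x ∈ f p := by
  induction l generalizing s0 with
  | nil => simp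
  | cons a t ih =>
    simp only [List.foldl_cons, ih, PySem.Set.mem_update, List.mem_cons]
    constructor
    · rintro (⟨h | h⟩ | ⟨p, hp, hx⟩)
      · exact Or.inl h
      · exact Or.inr ⟨a, Or.inl rfl, h⟩
      · exact Or.inr ⟨p, Or.inr hp, hx⟩
    · rintro (h | ⟨p, hp | hp, hx⟩)
      · exact Or.inl (Or.inl h)
      · exact Or.inl (Or.inr (hp ▸ hx))
      · exact Or.inr ⟨p, hp, hx⟩

theorem nodup_foldl_update {α : Type} (l : List α) (f : α → List Int)
    (s0 : PySem.Set Int) (h : s0.Nodup) :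
    (l.foldl (fun s p => PySem.Set.update s (f p)) s0).Nodup := by
  induction l generalizing s0 with
  | nil => exact h
  | cons a t ih => exact ih _ (PySem.Set.nodup_update _ _ h)

theorem flatMap_single (l : List Int) (u : Int) (f : Int → List Int) (hl : l.Nodup)
    (hf : ∀ x ∈ l, x ≠ u → f x = []) : l.flatMap f = if u ∈ l then f u else [] := by
  induction l with
  | nil => simp
  | cons a t ih =>
    simp only [List.nodup_cons] at hl
    rw [List.flatMap_cons, ih hl.2 (fun x hx => hf x (List.mem_cons_of_mem a hx))]
    by_cases hau : a = u
    · subst hau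
      rw [if_neg hl.1, if_pos (List.mem_cons_self)]
      simp
    · rw [hf a List.mem_cons_self hau]
      simp only [List.nil_append, List.mem_cons]
      by_cases hu : u ∈ t
      · rw [if_pos hu, if_pos (Or.inr hu)]
      · rw [if_neg hu, if_neg (by tauto)]

theorem flatMap_ite_singleton (l : List Int) (p : Int → Bool) :
    l.flatMap (fun x => if p x then [x] else []) = l.filter p := by
  induction l with
  | nil => simp
  | cons a t ih =>
    rw [List.flatMap_cons, ih, List.filter_cons]
    by_cases h : p a <;> simp [h]

theorem len_mono (ws : List String)
    (hsort : ws.Pairwise (fun a b => a.toList.length ≤ b.toList.length))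
    {a b : Nat} (ha : a < ws.length) (hb : b < ws.length)
    (h : ws[a].toList.length < ws[b].toList.length) : a < b := by
  rcases Nat.lt_or_ge a b with h1 | h1
  · exact h1
  · exfalso
    rcases Nat.lt_or_eq_of_le h1 with hba | hba
    · exact absurd (List.pairwise_iff_getElem.mp hsort b a hb ha hba) (by omega)
    · subst hba; omega

theorem buildAdj_getD (ws : List String) (n u : Int) :
    PySem.Dict.getD (buildAdj ws n) u [] =
      ((adjUps ws n).filter (fun q => q.1 == u)).map (·.2) := by
  have hb : buildAdj ws n =
      (adjUps ws n).foldl (fun d q => PySem.Dict.modify d q.1 [] (· ++ [q.2])) PySem.Dict.empty := by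
    unfold buildAdj adjUps
    rw [List.foldl_flatMap]
    apply PySem.List.foldl_congr_mem
    intro d i _
    rw [List.foldl_flatMap]
    apply PySem.List.foldl_congr_mem
    intro d' j _
    by_cases hc : isSimilar (PySem.List.pyGetD ws i "") (PySem.List.pyGetD ws j "") = true <;>
      simp [simIdx, hc]
  rw [hb, PySem.Dict.getD_foldl_modify_append]
  simp

theorem adjA_getD (ws : List String) (n u : Int) (hn : n = PySem.List.len ws)
    (hu : 0 ≤ u) (hun : u < n) :
    PySem.Dict.getD (buildAdj ws n) u [] = nbSmall ws u ++ nbLarge ws n u := by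
  rw [buildAdj_getD]
  unfold adjUps
  simp only [List.filter_flatMap, List.map_flatMap]
  have hinner : ∀ i j : Int,
      (((if simIdx ws i j = true then [(i, j), (j, i)] else []).filter
          (fun q => q.1 == u)).map (·.2))
        = if simIdx ws i j = true then
            ((if i = u then [j] else []) ++ (if j = u then [i] else [])) else [] := by
    intro i j
    by_cases hc : simIdx ws i j = true
    · rw [if_pos hc, if_pos hc]
      by_cases hi : i = u <;> by_cases hj : j = u <;> simp [hi, hj]
    · rw [if_neg hc, if_neg hc]
      simp
  have hrow_ne : ∀ i : Int, i ≠ u →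
      ((PySem.List.pyRange (i + 1) n 1).flatMap (fun j =>
        (((if simIdx ws i j = true then [(i, j), (j, i)] else []).filter
          (fun q => q.1 == u)).map (·.2))))
        = if i < u ∧ simIdx ws i u = true then [i] else [] := by
    intro i hi
    rw [flatMap_single _ u _ (PySem.List.nodup_pyRange_one _ _) (fun x hx hxu => by
      rw [hinner]
      simp [hi, hxu])]
    rw [hinner]
    by_cases hmem : u ∈ PySem.List.pyRange (i + 1) n 1
    · rw [if_pos hmem]
      have hm := PySem.List.mem_pyRange_one.mp hmem
      by_cases hs : simIdx ws i u = true <;> simp [hs, hi, show i < u by omega]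
    · rw [if_neg hmem]
      rw [PySem.List.mem_pyRange_one] at hmem
      rw [if_neg (by omega)]
  have hrow_u :
      ((PySem.List.pyRange (u + 1) n 1).flatMap (fun j =>
        (((if simIdx ws u j = true then [(u, j), (j, u)] else []).filter
          (fun q => q.1 == u)).map (·.2))))
        = nbLarge ws n u := by
    rw [List.flatMap_congr (fun j hj => by
      rw [hinner]
      have hju : j ≠ u := by
        rw [PySem.List.mem_pyRange_one] at hj
        omega
      by_cases hs : simIdx ws u j = true <;> simp [hs, hju] :
        ∀ j ∈ PySem.List.pyRange (u + 1) n 1, _ = (fun j => if simIdx ws u j = true then [j] else []) j)]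
    exact flatMap_ite_singleton _ _
  by_cases hlast : u < n - 1
  · rw [PySem.List.pyRange_one_append 0 u (n - 1) hu (by omega),
      PySem.List.pyRange_one_append u (u + 1) (n - 1) (by omega) (by omega),
      PySem.List.pyRange_one_singleton, List.flatMap_append, List.flatMap_append]
    have hseg1 : (PySem.List.pyRange 0 u 1).flatMap (fun i =>
        (PySem.List.pyRange (i + 1) n 1).flatMap (fun j =>
          (((if simIdx ws i j = true then [(i, j), (j, i)] else []).filter
            (fun q => q.1 == u)).map (·.2)))) = nbSmall ws u := by
      rw [List.flatMap_congr (fun i hi => by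
        have hiu : i < u := by
          rw [PySem.List.mem_pyRange_one] at hi
          omega
        rw [hrow_ne i (by omega)]
        by_cases hs : simIdx ws i u = true <;> simp [hs, hiu] :
          ∀ i ∈ PySem.List.pyRange 0 u 1, _ = (fun i => if simIdx ws i u = true then [i] else []) i)]
      exact flatMap_ite_singleton _ _
    have hseg3 : (PySem.List.pyRange (u + 1) (n - 1) 1).flatMap (fun i =>
        (PySem.List.pyRange (i + 1) n 1).flatMap (fun j =>
          (((if simIdx ws i j = true then [(i, j), (j, i)] else []).filter
            (fun q => q.1 == u)).map (·.2)))) = [] := by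
      rw [List.flatMap_congr (fun i hi => by
        have hiu : u < i := by
          rw [PySem.List.mem_pyRange_one] at hi
          omega
        rw [hrow_ne i (by omega), if_neg (by omega)] :
          ∀ i ∈ PySem.List.pyRange (u + 1) (n - 1) 1, _ = (fun _ : Int => ([] : List Int)) i)]
      simp
    rw [hseg1, hseg3, List.flatMap_cons, List.flatMap_nil, List.append_nil, List.append_nil, hrow_u]
  · have hu' : u = n - 1 := by omega
    have hnb : nbLarge ws n u = [] := by
      unfold nbLarge
      rw [PySem.List.pyRange_one_eq_nil (by omega)]
      rfl
    rw [hnb, List.append_nil, show n - 1 = u by omega]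
    rw [List.flatMap_congr (fun i hi => by
      have hiu : i < u := by
        rw [PySem.List.mem_pyRange_one] at hi
        omega
      rw [hrow_ne i (by omega)]
      by_cases hs : simIdx ws i u = true <;> simp [hs, hiu] :
        ∀ i ∈ PySem.List.pyRange 0 u 1, _ = (fun i => if simIdx ws i u = true then [i] else []) i)]
    exact flatMap_ite_singleton _ _

theorem altNeighbors_eq (ws : List String) (n u : Int) (hn : n = PySem.List.len ws)
    (hsort : ws.Pairwise (fun a b => a.toList.length ≤ b.toList.length))
    (hu : 0 ≤ u) (hun : u < n) :
    altNeighbors ws (altIndexes ws).1 (altIndexes ws).2 u = nbSmall ws u ++ nbLarge ws n u := by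
  have hn' : n = (ws.length : Int) := by simpa [pysem] using hn
  have huN : u.toNat < ws.length := by omega
  have hw : PySem.List.pyGetD ws u "" = ws[u.toNat] := PySem.List.pyGetD_eq_getElem ws "" hu (by omega)
  have strext : ∀ s t : String, s.toList = t.toList → s = t := fun s t h => String.toList_inj.mp h
  simp only [altNeighbors, hw]
  have h1 : PySem.List.sorted
      ((PySem.List.pyRange 0 (PySem.Str.len ws[u.toNat]) 1).foldl
        (fun s p => PySem.Set.update s
          (PySem.Dict.getD (altIndexes ws).1 (deleteAt ws[u.toNat] p) [])) [])
      (fun x => x) false = nbSmall ws u := by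
    apply PySem.List.sorted_eq_of_perm_of_pairwise_lt
    · refine (List.perm_ext_iff_of_nodup
        ((PySem.List.nodup_pyRange_one 0 u).filter _)
        (nodup_foldl_update _ _ _ List.nodup_nil)).mpr ?_
      intro x
      rw [List.mem_filter, PySem.List.mem_pyRange_one, mem_foldl_update]
      simp only [List.not_mem_nil, false_or, PySem.List.mem_pyRange_one, mem_index_getD]
      constructor
      · rintro ⟨⟨hx0, hxu⟩, hsim⟩
        have hxN : x.toNat < ws.length := by omega
        have hwx : PySem.List.pyGetD ws x "" = ws[x.toNat] :=
          PySem.List.pyGetD_eq_getElem ws "" hx0 (by omega)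
        rw [simIdx, hwx, hw, isSimilar_iff] at hsim
        obtain ⟨p, hp, he⟩ := hsim
        refine ⟨(p : Int), ⟨by omega, ?_⟩, x.toNat, hxN, by omega, ?_⟩
        · rw [strLen_eq]; omega
        · exact (strext _ _ (by rw [deleteAt_natCast, he])).symm
      · rintro ⟨p, ⟨hp0, hp1⟩, kN, hk, rfl, hv⟩
        rw [strLen_eq] at hp1
        have he : ws[u.toNat].toList.eraseIdx p.toNat = ws[kN].toList := by
          rw [← deleteAt_natCast, show ((p.toNat : Nat) : Int) = p by omega, ← hv]
        have hlt : kN < u.toNat := by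
          apply len_mono ws hsort hk huN
          have := congrArg List.length he
          rw [List.length_eraseIdx_of_lt (by omega)] at this
          omega
        refine ⟨⟨by omega, by omega⟩, ?_⟩
        have hwx : PySem.List.pyGetD ws (kN : Int) "" = ws[((kN : Int)).toNat] :=
          PySem.List.pyGetD_eq_getElem ws "" (by omega) (by omega)
        rw [simIdx, hwx, hw, isSimilar_iff]
        exact ⟨p.toNat, by omega, by simpa using he⟩
    · exact (PySem.List.pairwise_lt_pyRange_one 0 u).filter _
  have h2 : PySem.List.sorted
      (PySem.Set.ofList (PySem.Dict.getD (altIndexes ws).2 ws[u.toNat] []))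
      (fun x => x) false = nbLarge ws n u := by
    apply PySem.List.sorted_eq_of_perm_of_pairwise_lt
    · refine (List.perm_ext_iff_of_nodup
        ((PySem.List.nodup_pyRange_one (u + 1) n).filter _)
        (PySem.Set.nodup_ofList _)).mpr ?_
      intro x
      rw [List.mem_filter, PySem.List.mem_pyRange_one, PySem.Set.mem_ofList,
        mem_varIndex_getD]
      constructor
      · rintro ⟨⟨hx0, hxn⟩, hsim⟩
        have hxN : x.toNat < ws.length := by omega
        have hwx : PySem.List.pyGetD ws x "" = ws[x.toNat] :=
          PySem.List.pyGetD_eq_getElem ws "" (by omega) (by omega)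
        rw [simIdx, hw, hwx, isSimilar_iff] at hsim
        obtain ⟨p, hp, he⟩ := hsim
        exact ⟨x.toNat, hxN, by omega, p, hp, strext _ _ (by rw [deleteAt_natCast, he])⟩
      · rintro ⟨kN, hk, rfl, p, hp, hv⟩
        have he : ws[kN].toList.eraseIdx p = ws[u.toNat].toList := by
          rw [← deleteAt_natCast, hv]
        have hlt : u.toNat < kN := by
          apply len_mono ws hsort huN hk
          have := congrArg List.length he
          rw [List.length_eraseIdx_of_lt hp] at this
          omega
        refine ⟨⟨by omega, by omega⟩, ?_⟩
        have hwx : PySem.List.pyGetD ws (kN : Int) "" = ws[((kN : Int)).toNat] :=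
          PySem.List.pyGetD_eq_getElem ws "" (by omega) (by omega)
        rw [simIdx, hw, hwx, isSimilar_iff]
        exact ⟨p, by simpa using hp, by simpa using he⟩
    · exact (PySem.List.pairwise_lt_pyRange_one (u + 1) n).filter _
  rw [h1, h2]

theorem nb_range (ws : List String) (n u v : Int) (hu : 0 ≤ u) (hun : u < n)
    (hv : v ∈ nbSmall ws u ++ nbLarge ws n u) : 0 ≤ v ∧ v < n := by
  rcases List.mem_append.mp hv with h | h
  · have := (List.mem_filter.mp h).1
    rw [PySem.List.mem_pyRange_one] at this
    omega
  · have := (List.mem_filter.mp h).1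
    rw [PySem.List.mem_pyRange_one] at this
    omega

theorem mark_congr (ws : List String) (index varIndex : PySem.Dict String (List Int))
    (adj : PySem.Dict Int (List Int)) (n : Int)
    (hEq : ∀ u, 0 ≤ u → u < n →
      PySem.Dict.getD adj u [] = altNeighbors ws index varIndex u)
    (hRange : ∀ u v, 0 ≤ u → u < n → v ∈ PySem.Dict.getD adj u [] → 0 ≤ v ∧ v < n) :
    ∀ fuel u vis, 0 ≤ u → u < n →
      markDfs adj fuel u vis = altMark ws index varIndex fuel u vis := by
  intro fuel
  induction fuel with
  | zero => intro u vis _ _; rfl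
  | succ f ih =>
    intro u vis hu hun
    show (PySem.Dict.getD adj u []).foldl _ _ = (altNeighbors ws index varIndex u).foldl _ _
    rw [← hEq u hu hun]
    have hmem : ∀ v ∈ PySem.Dict.getD adj u [], 0 ≤ v ∧ v < n :=
      fun v hv => hRange u v hu hun hv
    suffices h : ∀ (L : List Int), (∀ v ∈ L, 0 ≤ v ∧ v < n) → ∀ vs : PySem.Set Int,
        L.foldl (fun vs v => if v ∈ vs then vs else markDfs adj f v vs) vs
          = L.foldl (fun vs v => if v ∈ vs then vs else altMark ws index varIndex f v vs) vs by
      exact h _ hmem _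
    intro L
    induction L with
    | nil => intro _ _; rfl
    | cons a t ihl =>
      intro hm vs
      have ha := hm a List.mem_cons_self
      simp only [List.foldl_cons]
      rw [ih a _ ha.1 ha.2]
      exact ihl (fun v hv => hm v (List.mem_cons_of_mem a hv)) _

-- ===== VERDICT (by name: the statement is the Claim_ definition above) =====
theorem numberOfDistinctMeanings_spec : Claim_equal_numberOfDistinctMeanings := by
  intro words _
  unfold Spec_numberOfDistinctMeanings numberOfDistinctMeanings numberOfDistinctMeanings_alt
  dsimp only
  refine congrArg Prod.snd ?_
  have hsort : (PySem.List.sorted words (fun w => PySem.Str.len w) false).Pairwise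
      (fun a b => a.toList.length ≤ b.toList.length) := by
    refine (PySem.List.sorted_pairwise words (fun w => PySem.Str.len w)).imp ?_
    intro a b h
    rw [strLen_eq, strLen_eq] at h
    exact_mod_cast h
  have hEq : ∀ u, 0 ≤ u → u < PySem.List.len (PySem.List.sorted words (fun w => PySem.Str.len w) false) →
      PySem.Dict.getD (buildAdj (PySem.List.sorted words (fun w => PySem.Str.len w) false)
          (PySem.List.len (PySem.List.sorted words (fun w => PySem.Str.len w) false))) u [] =
        altNeighbors (PySem.List.sorted words (fun w => PySem.Str.len w) false)
          (altIndexes (PySem.List.sorted words (fun w => PySem.Str.len w) false)).1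
          (altIndexes (PySem.List.sorted words (fun w => PySem.Str.len w) false)).2 u :=
    fun u hu hun => (adjA_getD _ _ u rfl hu hun).trans (altNeighbors_eq _ _ u rfl hsort hu hun).symm
  have hRange : ∀ u v, 0 ≤ u → u < PySem.List.len (PySem.List.sorted words (fun w => PySem.Str.len w) false) →
      v ∈ PySem.Dict.getD (buildAdj (PySem.List.sorted words (fun w => PySem.Str.len w) false)
          (PySem.List.len (PySem.List.sorted words (fun w => PySem.Str.len w) false))) u [] →
      0 ≤ v ∧ v < PySem.List.len (PySem.List.sorted words (fun w => PySem.Str.len w) false) :=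
    fun u v hu hun hv => nb_range _ _ u v hu hun (by rwa [adjA_getD _ _ u rfl hu hun] at hv)
  have hmc := mark_congr _ _ _ _ _ hEq hRange
  apply PySem.List.foldl_congr_mem
  intro st i hi
  have hi' := PySem.List.mem_pyRange_one.mp hi
  by_cases hv : i ∈ st.1
  · rw [if_pos hv, if_pos hv]
  · rw [if_neg hv, if_neg hv, hmc _ i st.1 hi'.1 hi'.2]
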